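-- pv_equiv track=rewrite | github.com/pypi-data/pypi-mirror-398 | packages/databricks-labs-dqx/databricks_labs_dqx-0.12.0-py3-none-any.whl/databricks/labs/dqx/datacontract/contract_rules_generator.py | _convert_to_python_format
-- ===== SOURCE A (Python) =====
-- def _convert_to_python_format(format_str: str) -> str:
--     """
--     Convert Java SimpleDateFormat or ISO 8601 format to Python strftime format.
--
--     Common mappings:
--     - yyyy -> %Y (4-digit year)
--     - MM -> %m (2-digit month)
--     - dd -> %d (2-digit day)
--     - HH -> %H (24-hour format)
--     - mm -> %M (minutes)
--     - ss -> %S (seconds)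
--     """
--     # If it's already in Python format (starts with %), return as-is
--     if '%' in format_str:
--         return format_str
--
--     # Common Java SimpleDateFormat to Python strftime conversions
--     conversions = {
--         'yyyy': '%Y',
--         'yy': '%y',
--         'MM': '%m',
--         'dd': '%d',
--         'HH': '%H',
--         'hh': '%I',
--         'mm': '%M',
--         'ss': '%S',
--         'SSS': '%f',  # Milliseconds
--         'a': '%p',  # AM/PM
--     }
--
--     result = format_str
--     for java_fmt, python_fmt in conversions.items():
--         result = result.replace(java_fmt, python_fmt)
--
--     return result
-- ===== SOURCE B (Python) =====
-- # Single left-to-right scan with longest-token-first matching, instead of ten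
-- # sequential str.replace() passes.  On inputs where A's later replace pass
-- # re-matches a character inserted by an earlier pass ('MMm' -> '%%M',
-- # 'ssSS' -> '%%f'), B returns the intended token-by-token translation
-- # ('%mm', '%SSS'): see D_ in the claim.
-- def _convert_to_python_format(format_str: str) -> str:
--     if '%' in format_str:
--         return format_str
--     tokens = [
--         ('yyyy', '%Y'),
--         ('SSS', '%f'),
--         ('yy', '%y'),
--         ('MM', '%m'),
--         ('dd', '%d'),
--         ('HH', '%H'),
--         ('hh', '%I'),
--         ('mm', '%M'),
--         ('ss', '%S'),
--         ('a', '%p'),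
--     ]
--     parts = []
--     i = 0
--     n = len(format_str)
--     while i < n:
--         for java_fmt, python_fmt in tokens:
--             if format_str.startswith(java_fmt, i):
--                 parts.append(python_fmt)
--                 i += len(java_fmt)
--                 break
--         else:
--             parts.append(format_str[i])
--             i += 1
--     return ''.join(parts)
-- ===== Notes on version B (the rewrite author's own statement) =====
-- stated objective: alternative
-- what changed: Replaced the ten sequential whole-string str.replace() passes with a single left-to-right scan that matches the Java tokens longest-first and copies other characters through.
-- intended difference: On '%'-free inputs containing 'MMm' or 'ssSS' (an even-length 'M'/'s' pair-run followed by 'm'/'SS'), A's later replace pass re-matches the 'm'/'S' character its earlier pass just inserted and emits a stray '%%' escape (A('MMm')='%%M', A('ssSS')='%%f'); B returns the token-by-token translation ('%mm', '%SSS'), which is the intended strftime output. — e.g. on _convert_to_python_format("MMm"): A returns "%%M", B returns "%mm"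
import Mathlib
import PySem

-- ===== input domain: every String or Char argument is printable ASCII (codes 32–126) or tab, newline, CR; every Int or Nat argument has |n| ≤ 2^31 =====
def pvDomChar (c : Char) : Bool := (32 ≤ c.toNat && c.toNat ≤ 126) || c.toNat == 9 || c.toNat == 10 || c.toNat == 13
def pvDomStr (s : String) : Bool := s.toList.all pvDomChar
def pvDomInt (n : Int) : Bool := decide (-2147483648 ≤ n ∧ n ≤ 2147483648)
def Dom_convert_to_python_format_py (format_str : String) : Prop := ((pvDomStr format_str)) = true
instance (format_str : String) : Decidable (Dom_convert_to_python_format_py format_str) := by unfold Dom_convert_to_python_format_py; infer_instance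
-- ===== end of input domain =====

-- B replaces A's ten sequential str.replace passes by one longest-token-first scan; on the
-- exceptional inputs described at D_ below, A re-matches characters it itself inserted and
-- B instead returns the intended token-by-token translation (return values only; no mutation).

-- ===== PORT A =====
def convert_to_python_format_py (format_str : String) : String :=
  -- if '%' in format_str: return format_str
  if PySem.Str.isIn "%" format_str = true then format_str
  else
    -- result = format_str; for java_fmt, python_fmt in conversions.items(): result = result.replace(...)
    [("yyyy", "%Y"), ("yy", "%y"), ("MM", "%m"), ("dd", "%d"), ("HH", "%H"),
     ("hh", "%I"), ("mm", "%M"), ("ss", "%S"), ("SSS", "%f"), ("a", "%p")].foldl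
      (fun result p => PySem.Str.replace result p.1 p.2) format_str

-- ===== PORT B =====
-- Source B's scan loop; the inner for-loop over the ten constant (token, code) pairs is unrolled
-- in the same longest-first order.
def pvAltScan : List Char → List Char
  | [] => []
  | c :: t =>
    if ['y','y','y','y'].isPrefixOf (c :: t) then ['%','Y'] ++ pvAltScan (t.drop 3)
    else if ['S','S','S'].isPrefixOf (c :: t) then ['%','f'] ++ pvAltScan (t.drop 2)
    else if ['y','y'].isPrefixOf (c :: t) then ['%','y'] ++ pvAltScan (t.drop 1)
    else if ['M','M'].isPrefixOf (c :: t) then ['%','m'] ++ pvAltScan (t.drop 1)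
    else if ['d','d'].isPrefixOf (c :: t) then ['%','d'] ++ pvAltScan (t.drop 1)
    else if ['H','H'].isPrefixOf (c :: t) then ['%','H'] ++ pvAltScan (t.drop 1)
    else if ['h','h'].isPrefixOf (c :: t) then ['%','I'] ++ pvAltScan (t.drop 1)
    else if ['m','m'].isPrefixOf (c :: t) then ['%','M'] ++ pvAltScan (t.drop 1)
    else if ['s','s'].isPrefixOf (c :: t) then ['%','S'] ++ pvAltScan (t.drop 1)
    else if c = 'a' then ['%','p'] ++ pvAltScan t
    else c :: pvAltScan t
  termination_by l => l.length
  decreasing_by all_goals simp [List.length_drop]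

def convert_to_python_format_py_alt (format_str : String) : String :=
  if PySem.Str.isIn "%" format_str = true then format_str
  else String.ofList (pvAltScan format_str.toList)

-- ===== PRECONDITION & SPEC =====
-- On '%'-free inputs where an even-length pair-run of 'M' is immediately followed by 'm', or
-- an even-length pair-run of 's' by 'SS' (stated below by collapsing each complete 'MM'/'ss'
-- pair to a '%' marker and asking whether the marker touches 'm'/'SS'), A's later replace
-- pass re-matches the
-- 'm'/'S' character its earlier pass just inserted and emit a stray '%%' escape
-- (A "MMm" = "%%M", A "ssSS" = "%%f"); B returns the token-by-token translation
-- ("%mm", "%SSS"), which is the intended strftime output.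
def D_convert_to_python_format_py (format_str : String) : Prop :=
  PySem.Str.isIn "%" format_str = false ∧
    (PySem.Str.isIn "%m" (PySem.Str.replace format_str "MM" "%") ||
      PySem.Str.isIn "%SS" (PySem.Str.replace format_str "ss" "%")) = true
instance (format_str : String) : Decidable (D_convert_to_python_format_py format_str) := by
  unfold D_convert_to_python_format_py; infer_instance

def Spec_convert_to_python_format_py (format_str : String) (out : String) : Prop :=
  ¬ D_convert_to_python_format_py format_str → out = convert_to_python_format_py_alt format_str
instance (format_str : String) (out : String) : Decidable (Spec_convert_to_python_format_py format_str out) := by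
  unfold Spec_convert_to_python_format_py; infer_instance

def pvDiffWitness_convert_to_python_format_py : String := "MMm"
def pvDiffWitnessOut_convert_to_python_format_py : String × String := ("%%M", "%mm")

-- ===== CLAIM (what is proved, stated in full; the proofs are below) =====
def Claim_unchanged_convert_to_python_format_py : Prop := ∀ (format_str : String), Dom_convert_to_python_format_py format_str → Spec_convert_to_python_format_py format_str (convert_to_python_format_py format_str)
def Claim_exact_convert_to_python_format_py : Prop := ∀ (format_str : String), Dom_convert_to_python_format_py format_str → D_convert_to_python_format_py format_str → convert_to_python_format_py format_str ≠ convert_to_python_format_py_alt format_str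
def Claim_changed_convert_to_python_format_py : Prop := Dom_convert_to_python_format_py (pvDiffWitness_convert_to_python_format_py) ∧ D_convert_to_python_format_py (pvDiffWitness_convert_to_python_format_py) ∧ convert_to_python_format_py (pvDiffWitness_convert_to_python_format_py) = pvDiffWitnessOut_convert_to_python_format_py.1 ∧ convert_to_python_format_py_alt (pvDiffWitness_convert_to_python_format_py) = pvDiffWitnessOut_convert_to_python_format_py.2 ∧ pvDiffWitnessOut_convert_to_python_format_py.1 ≠ pvDiffWitnessOut_convert_to_python_format_py.2

-- ===== LEMMAS AND PROOFS =====

-- the two re-match patterns of A, counted pair-by-pair (proof-side only)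
def pvBadT (a : Char) (p : List Char) : List Char → Bool
  | b :: c :: t => if b = a ∧ c = a then (t.take p.length = p || pvBadT a p t) else pvBadT a p (c :: t)
  | _ => false

-- Python's s.replace(old, new) for nonempty old, as plain structural recursion on the list.
def pvRepl (o : Char) (os : List Char) (new : List Char) : List Char → List Char
  | [] => []
  | c :: t =>
    if (o :: os).isPrefixOf (c :: t) then new ++ pvRepl o os new (t.drop os.length)
    else c :: pvRepl o os new t
  termination_by l => l.length
  decreasing_by all_goals simp [List.length_drop]

theorem pvGo_eq (o : Char) (os new : List Char) :
    ∀ fuel l acc, l.length ≤ fuel →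
      PySem.Chars.replace.go (o :: os) new fuel l acc = acc.reverse ++ pvRepl o os new l := by
  intro fuel
  induction fuel using Nat.strong_induction_on with
  | _ fuel ih =>
    intro l acc hl
    cases l with
    | nil =>
      cases fuel with
      | zero => simp [PySem.Chars.replace.go.eq_1, pvRepl]
      | succ f => simp [PySem.Chars.replace.go.eq_2 _ _ (f + 1) acc (by omega), pvRepl]
    | cons c t =>
      cases fuel with
      | zero => simp at hl
      | succ f =>
        rw [PySem.Chars.replace.go.eq_3]
        by_cases hp : (o :: os).isPrefixOf (c :: t) = true
        · rw [if_pos hp, ih f (by omega) _ _ (by simp [List.length_drop] at hl ⊢; omega)]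
          rw [pvRepl, if_pos hp]
          simp
        · rw [if_neg hp, ih f (by omega) _ _ (by simp at hl ⊢; omega)]
          rw [pvRepl, if_neg hp]
          simp

theorem pvReplace_eq (o : Char) (os new s : List Char) :
    PySem.Chars.replace s (o :: os) new = pvRepl o os new s := by
  rw [PySem.Chars.replace]
  simp [pvGo_eq o os new s.length s [] (le_refl _)]

theorem pvPfxF {o c : Char} (os t : List Char) (h : o ≠ c) :
    (o :: os).isPrefixOf (c :: t) = false := by
  simp [List.isPrefixOf]; intro hh; exact absurd hh h

theorem pvRepl_skip {o c : Char} {os new t : List Char}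
    (h : (o :: os).isPrefixOf (c :: t) = false) :
    pvRepl o os new (c :: t) = c :: pvRepl o os new t := by
  rw [pvRepl, h]; simp

theorem pvRepl_skip' {o c : Char} (os new t : List Char) (h : o ≠ c) :
    pvRepl o os new (c :: t) = c :: pvRepl o os new t :=
  pvRepl_skip (pvPfxF os t h)

theorem pvRepl_match (o : Char) (os new t : List Char) :
    pvRepl o os new ((o :: os) ++ t) = new ++ pvRepl o os new t := by
  simp only [List.cons_append]
  rw [pvRepl]
  have hp : (o :: os).isPrefixOf (o :: (os ++ t)) = true := by
    simp [List.isPrefixOf_iff_prefix]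
  rw [if_pos hp]
  simp

theorem pvRepl_head {o c n0 : Char} {os ns : List Char} (hn : n0 ≠ c) :
    ∀ v : List Char, v.head? ≠ some c → (pvRepl o os (n0 :: ns) v).head? ≠ some c := by
  intro v hv
  match v with
  | [] => simp [pvRepl]
  | c' :: t =>
    rw [pvRepl]
    by_cases hp : (o :: os).isPrefixOf (c' :: t) = true
    · rw [if_pos hp]; simp [hn]
    · rw [if_neg hp]; simpa using hv

-- the ten passes of A as cumulative stages, innermost applied first
def pvS1 (l : List Char) : List Char := pvRepl 'y' ['y','y','y'] ['%','Y'] l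
def pvS2 (l : List Char) : List Char := pvRepl 'y' ['y'] ['%','y'] (pvS1 l)
def pvS3 (l : List Char) : List Char := pvRepl 'M' ['M'] ['%','m'] (pvS2 l)
def pvS4 (l : List Char) : List Char := pvRepl 'd' ['d'] ['%','d'] (pvS3 l)
def pvS5 (l : List Char) : List Char := pvRepl 'H' ['H'] ['%','H'] (pvS4 l)
def pvS6 (l : List Char) : List Char := pvRepl 'h' ['h'] ['%','I'] (pvS5 l)
def pvS7 (l : List Char) : List Char := pvRepl 'm' ['m'] ['%','M'] (pvS6 l)
def pvS8 (l : List Char) : List Char := pvRepl 's' ['s'] ['%','S'] (pvS7 l)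
def pvS9 (l : List Char) : List Char := pvRepl 'S' ['S','S'] ['%','f'] (pvS8 l)
def pvPipe (l : List Char) : List Char := pvRepl 'a' [] ['%','p'] (pvS9 l)

theorem pvPfxF' {o : Char} (os : List Char) {w : List Char} (h : w.head? ≠ some o) :
    (o :: os).isPrefixOf w = false := by
  cases w with
  | nil => simp [List.isPrefixOf]
  | cons c t =>
    simp at h
    exact pvPfxF os t (fun e => h (e ▸ rfl))

theorem pvPfx_cons (o c : Char) (os w : List Char) :
    (o :: os).isPrefixOf (c :: w) = (o == c && os.isPrefixOf w) := by
  simp [List.isPrefixOf]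

theorem pvPfxF2 {o c o' : Char} (os' : List Char) {w : List Char} (h : w.head? ≠ some o') :
    (o :: o' :: os').isPrefixOf (c :: w) = false := by
  rw [pvPfx_cons, pvPfxF' os' h]; simp

theorem pvRepl_skipb {o c : Char} {os new t : List Char} (h : (o == c) = false) :
    pvRepl o os new (c :: t) = c :: pvRepl o os new t :=
  pvRepl_skip (pvPfxF os t (by simpa using h))

-- head?-preservation through the stages ('%' never re-matches)
theorem pvS1_head {c : Char} (hc : c ≠ '%') {u : List Char} (h : u.head? ≠ some c) :
    (pvS1 u).head? ≠ some c := pvRepl_head (Ne.symm hc) u h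
theorem pvS2_head {c : Char} (hc : c ≠ '%') {u : List Char} (h : u.head? ≠ some c) :
    (pvS2 u).head? ≠ some c := pvRepl_head (Ne.symm hc) _ (pvS1_head hc h)
theorem pvS3_head {c : Char} (hc : c ≠ '%') {u : List Char} (h : u.head? ≠ some c) :
    (pvS3 u).head? ≠ some c := pvRepl_head (Ne.symm hc) _ (pvS2_head hc h)
theorem pvS4_head {c : Char} (hc : c ≠ '%') {u : List Char} (h : u.head? ≠ some c) :
    (pvS4 u).head? ≠ some c := pvRepl_head (Ne.symm hc) _ (pvS3_head hc h)
theorem pvS5_head {c : Char} (hc : c ≠ '%') {u : List Char} (h : u.head? ≠ some c) :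
    (pvS5 u).head? ≠ some c := pvRepl_head (Ne.symm hc) _ (pvS4_head hc h)
theorem pvS6_head {c : Char} (hc : c ≠ '%') {u : List Char} (h : u.head? ≠ some c) :
    (pvS6 u).head? ≠ some c := pvRepl_head (Ne.symm hc) _ (pvS5_head hc h)
theorem pvS7_head {c : Char} (hc : c ≠ '%') {u : List Char} (h : u.head? ≠ some c) :
    (pvS7 u).head? ≠ some c := pvRepl_head (Ne.symm hc) _ (pvS6_head hc h)
theorem pvS8_head {c : Char} (hc : c ≠ '%') {u : List Char} (h : u.head? ≠ some c) :
    (pvS8 u).head? ≠ some c := pvRepl_head (Ne.symm hc) _ (pvS7_head hc h)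

theorem pvRepl_nil (o : Char) (os new : List Char) : pvRepl o os new [] = [] := by
  rw [pvRepl]

theorem pvS8_nil : pvS8 [] = [] := by
  simp [pvS8, pvS7, pvS6, pvS5, pvS4, pvS3, pvS2, pvS1, pvRepl_nil]

theorem pvS8_Scons (t : List Char) : pvS8 ('S' :: t) = 'S' :: pvS8 t := by
  unfold pvS8 pvS7 pvS6 pvS5 pvS4 pvS3 pvS2 pvS1
  simp only [pvRepl_skipb, Char.reduceBEq]

theorem pvPipe_nil : pvPipe [] = [] := by
  simp [pvPipe, pvS9, pvS8_nil, pvRepl_nil]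

-- master lemma: a single character no pass matches at passes through unchanged
theorem pvRepl_match1 (o n1 n2 : Char) (w : List Char) :
    pvRepl o [] [n1,n2] (o::w) = n1::n2::pvRepl o [] [n1,n2] w := by
  simpa using pvRepl_match o [] [n1,n2] w

theorem pvRepl_match2 (o b n1 n2 : Char) (w : List Char) :
    pvRepl o [b] [n1,n2] (o::b::w) = n1::n2::pvRepl o [b] [n1,n2] w := by
  simpa using pvRepl_match o [b] [n1,n2] w

theorem pvRepl_match3 (o b c' n1 n2 : Char) (w : List Char) :
    pvRepl o [b,c'] [n1,n2] (o::b::c'::w) = n1::n2::pvRepl o [b,c'] [n1,n2] w := by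
  simpa using pvRepl_match o [b,c'] [n1,n2] w

theorem pvRepl_match4 (o b c' d n1 n2 : Char) (w : List Char) :
    pvRepl o [b,c',d] [n1,n2] (o::b::c'::d::w) = n1::n2::pvRepl o [b,c',d] [n1,n2] w := by
  simpa using pvRepl_match o [b,c',d] [n1,n2] w

theorem pvPipe_cons' (c : Char) (t : List Char)
    (g1 : ['y','y','y','y'].isPrefixOf (c :: t) = false)
    (g2 : ['y','y'].isPrefixOf (c :: pvS1 t) = false)
    (g3 : ['M','M'].isPrefixOf (c :: pvS2 t) = false)
    (g4 : ['d','d'].isPrefixOf (c :: pvS3 t) = false)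
    (g5 : ['H','H'].isPrefixOf (c :: pvS4 t) = false)
    (g6 : ['h','h'].isPrefixOf (c :: pvS5 t) = false)
    (g7 : ['m','m'].isPrefixOf (c :: pvS6 t) = false)
    (g8 : ['s','s'].isPrefixOf (c :: pvS7 t) = false)
    (g9 : ['S','S','S'].isPrefixOf (c :: pvS8 t) = false)
    (g10 : c ≠ 'a') :
    pvPipe (c :: t) = c :: pvPipe t := by
  unfold pvS1 at g2
  unfold pvS2 pvS1 at g3
  unfold pvS3 pvS2 pvS1 at g4
  unfold pvS4 pvS3 pvS2 pvS1 at g5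
  unfold pvS5 pvS4 pvS3 pvS2 pvS1 at g6
  unfold pvS6 pvS5 pvS4 pvS3 pvS2 pvS1 at g7
  unfold pvS7 pvS6 pvS5 pvS4 pvS3 pvS2 pvS1 at g8
  unfold pvS8 pvS7 pvS6 pvS5 pvS4 pvS3 pvS2 pvS1 at g9
  unfold pvPipe pvS9 pvS8 pvS7 pvS6 pvS5 pvS4 pvS3 pvS2 pvS1
  rw [pvRepl_skip g1, pvRepl_skip g2, pvRepl_skip g3, pvRepl_skip g4, pvRepl_skip g5,
      pvRepl_skip g6, pvRepl_skip g7, pvRepl_skip g8, pvRepl_skip g9,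
      pvRepl_skip' _ _ _ (Ne.symm g10)]

theorem pvPipe_yyyy (t : List Char) :
    pvPipe ('y'::'y'::'y'::'y'::t) = '%'::'Y'::pvPipe t := by
  unfold pvPipe pvS9 pvS8 pvS7 pvS6 pvS5 pvS4 pvS3 pvS2 pvS1
  simp only [pvRepl_match4, pvRepl_skipb, Char.reduceBEq]

theorem pvPipe_yy (t : List Char)
    (g1 : ['y','y','y','y'].isPrefixOf ('y'::'y'::t) = false)
    (g2 : ['y','y','y','y'].isPrefixOf ('y'::t) = false) :
    pvPipe ('y'::'y'::t) = '%'::'y'::pvPipe t := by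
  unfold pvPipe pvS9 pvS8 pvS7 pvS6 pvS5 pvS4 pvS3 pvS2 pvS1
  rw [pvRepl_skip g1, pvRepl_skip g2]
  simp only [pvRepl_match2, pvRepl_skipb, Char.reduceBEq]

theorem pvPipe_MM (t : List Char)
    (g7 : ['m','m'].isPrefixOf ('m' :: pvS6 t) = false) :
    pvPipe ('M'::'M'::t) = '%'::'m'::pvPipe t := by
  unfold pvS6 pvS5 pvS4 pvS3 pvS2 pvS1 at g7
  unfold pvPipe pvS9 pvS8 pvS7 pvS6 pvS5 pvS4 pvS3 pvS2 pvS1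
  simp only [pvRepl_match2, pvRepl_skipb, Char.reduceBEq]
  rw [pvRepl_skip g7]
  simp only [pvRepl_skipb, Char.reduceBEq]

theorem pvPipe_dd (t : List Char) : pvPipe ('d'::'d'::t) = '%'::'d'::pvPipe t := by
  unfold pvPipe pvS9 pvS8 pvS7 pvS6 pvS5 pvS4 pvS3 pvS2 pvS1
  simp only [pvRepl_match2, pvRepl_skipb, Char.reduceBEq]

theorem pvPipe_HH (t : List Char) : pvPipe ('H'::'H'::t) = '%'::'H'::pvPipe t := by
  unfold pvPipe pvS9 pvS8 pvS7 pvS6 pvS5 pvS4 pvS3 pvS2 pvS1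
  simp only [pvRepl_match2, pvRepl_skipb, Char.reduceBEq]

theorem pvPipe_hh (t : List Char) : pvPipe ('h'::'h'::t) = '%'::'I'::pvPipe t := by
  unfold pvPipe pvS9 pvS8 pvS7 pvS6 pvS5 pvS4 pvS3 pvS2 pvS1
  simp only [pvRepl_match2, pvRepl_skipb, Char.reduceBEq]

theorem pvPipe_mm (t : List Char) : pvPipe ('m'::'m'::t) = '%'::'M'::pvPipe t := by
  unfold pvPipe pvS9 pvS8 pvS7 pvS6 pvS5 pvS4 pvS3 pvS2 pvS1
  simp only [pvRepl_match2, pvRepl_skipb, Char.reduceBEq]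

theorem pvPipe_ss (t : List Char)
    (g9 : ['S','S','S'].isPrefixOf ('S' :: pvS8 t) = false) :
    pvPipe ('s'::'s'::t) = '%'::'S'::pvPipe t := by
  unfold pvS8 pvS7 pvS6 pvS5 pvS4 pvS3 pvS2 pvS1 at g9
  unfold pvPipe pvS9 pvS8 pvS7 pvS6 pvS5 pvS4 pvS3 pvS2 pvS1
  simp only [pvRepl_match2, pvRepl_skipb, Char.reduceBEq]
  rw [pvRepl_skip g9]
  simp only [pvRepl_skipb, Char.reduceBEq]

theorem pvPipe_SSS (t : List Char) : pvPipe ('S'::'S'::'S'::t) = '%'::'f'::pvPipe t := by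
  unfold pvPipe pvS9 pvS8 pvS7 pvS6 pvS5 pvS4 pvS3 pvS2 pvS1
  simp only [pvRepl_match3, pvRepl_skipb, Char.reduceBEq]

theorem pvPipe_a (t : List Char) : pvPipe ('a'::t) = '%'::'p'::pvPipe t := by
  unfold pvPipe pvS9 pvS8 pvS7 pvS6 pvS5 pvS4 pvS3 pvS2 pvS1
  simp only [pvRepl_match1, pvRepl_skipb, Char.reduceBEq]

theorem pvPfxF3 {o o' o'' c c' : Char} (os' : List Char) {w : List Char}
    (h : w.head? ≠ some o'') :
    (o :: o' :: o'' :: os').isPrefixOf (c :: c' :: w) = false := by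
  rw [pvPfx_cons, pvPfx_cons, pvPfxF' os' h]; simp

-- scanner evaluation lemmas
theorem sc_nil : pvAltScan [] = [] := by simp [pvAltScan]

theorem sc_yyyy (t : List Char) : pvAltScan ('y'::'y'::'y'::'y'::t) = '%'::'Y'::pvAltScan t := by
  rw [pvAltScan]; simp [List.isPrefixOf]

theorem sc_y (t : List Char) (h : t.head? ≠ some 'y') :
    pvAltScan ('y'::t) = 'y'::pvAltScan t := by
  rw [pvAltScan]
  simp [List.isPrefixOf, pvPfxF' ['y','y'] h, pvPfxF' ([] : List Char) h]

theorem sc_yy (t : List Char) (h : t.head? ≠ some 'y') :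
    pvAltScan ('y'::'y'::t) = '%'::'y'::pvAltScan t := by
  rw [pvAltScan]
  simp [List.isPrefixOf, pvPfxF' ['y'] h]

theorem sc_yyy (t : List Char) (h : t.head? ≠ some 'y') :
    pvAltScan ('y'::'y'::'y'::t) = '%'::'y'::'y'::pvAltScan t := by
  rw [pvAltScan]
  simp [List.isPrefixOf, pvPfxF' ([] : List Char) h, sc_y t h]

theorem sc_MM (t : List Char) : pvAltScan ('M'::'M'::t) = '%'::'m'::pvAltScan t := by
  rw [pvAltScan]; simp [List.isPrefixOf]

theorem sc_M (t : List Char) (h : t.head? ≠ some 'M') :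
    pvAltScan ('M'::t) = 'M'::pvAltScan t := by
  rw [pvAltScan]; simp [List.isPrefixOf, pvPfxF' ([] : List Char) h]

theorem sc_dd (t : List Char) : pvAltScan ('d'::'d'::t) = '%'::'d'::pvAltScan t := by
  rw [pvAltScan]; simp [List.isPrefixOf]

theorem sc_d (t : List Char) (h : t.head? ≠ some 'd') :
    pvAltScan ('d'::t) = 'd'::pvAltScan t := by
  rw [pvAltScan]; simp [List.isPrefixOf, pvPfxF' ([] : List Char) h]

theorem sc_HH (t : List Char) : pvAltScan ('H'::'H'::t) = '%'::'H'::pvAltScan t := by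
  rw [pvAltScan]; simp [List.isPrefixOf]

theorem sc_H (t : List Char) (h : t.head? ≠ some 'H') :
    pvAltScan ('H'::t) = 'H'::pvAltScan t := by
  rw [pvAltScan]; simp [List.isPrefixOf, pvPfxF' ([] : List Char) h]

theorem sc_hh (t : List Char) : pvAltScan ('h'::'h'::t) = '%'::'I'::pvAltScan t := by
  rw [pvAltScan]; simp [List.isPrefixOf]

theorem sc_h (t : List Char) (h : t.head? ≠ some 'h') :
    pvAltScan ('h'::t) = 'h'::pvAltScan t := by
  rw [pvAltScan]; simp [List.isPrefixOf, pvPfxF' ([] : List Char) h]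

theorem sc_mm (t : List Char) : pvAltScan ('m'::'m'::t) = '%'::'M'::pvAltScan t := by
  rw [pvAltScan]; simp [List.isPrefixOf]

theorem sc_m (t : List Char) (h : t.head? ≠ some 'm') :
    pvAltScan ('m'::t) = 'm'::pvAltScan t := by
  rw [pvAltScan]; simp [List.isPrefixOf, pvPfxF' ([] : List Char) h]

theorem sc_ss (t : List Char) : pvAltScan ('s'::'s'::t) = '%'::'S'::pvAltScan t := by
  rw [pvAltScan]; simp [List.isPrefixOf]

theorem sc_s (t : List Char) (h : t.head? ≠ some 's') :
    pvAltScan ('s'::t) = 's'::pvAltScan t := by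
  rw [pvAltScan]; simp [List.isPrefixOf, pvPfxF' ([] : List Char) h]

theorem sc_SSS (t : List Char) : pvAltScan ('S'::'S'::'S'::t) = '%'::'f'::pvAltScan t := by
  rw [pvAltScan]; simp [List.isPrefixOf]

theorem sc_S (t : List Char) (h : t.head? ≠ some 'S') :
    pvAltScan ('S'::t) = 'S'::pvAltScan t := by
  rw [pvAltScan]; simp [List.isPrefixOf, pvPfxF' ['S'] h]

theorem sc_SS (t : List Char) (h : t.head? ≠ some 'S') :
    pvAltScan ('S'::'S'::t) = 'S'::'S'::pvAltScan t := by
  rw [pvAltScan]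
  simp [List.isPrefixOf, pvPfxF' ([] : List Char) h, sc_S t h]

theorem sc_a (t : List Char) : pvAltScan ('a'::t) = '%'::'p'::pvAltScan t := by
  rw [pvAltScan]; simp [List.isPrefixOf]

theorem sc_other (c : Char) (t : List Char) (h1 : c ≠ 'y') (h2 : c ≠ 'M') (h3 : c ≠ 'd')
    (h4 : c ≠ 'H') (h5 : c ≠ 'h') (h6 : c ≠ 'm') (h7 : c ≠ 's') (h8 : c ≠ 'S') (h9 : c ≠ 'a') :
    pvAltScan (c::t) = c::pvAltScan t := by
  rw [pvAltScan]
  simp [pvPfxF _ _ (Ne.symm h1), pvPfxF _ _ (Ne.symm h2), pvPfxF _ _ (Ne.symm h3),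
        pvPfxF _ _ (Ne.symm h4), pvPfxF _ _ (Ne.symm h5), pvPfxF _ _ (Ne.symm h6),
        pvPfxF _ _ (Ne.symm h7), pvPfxF _ _ (Ne.symm h8), h9]

-- bad-pattern bookkeeping
theorem pvBad_ne {a : Char} {p : List Char} {c : Char} {t : List Char} (h : ¬ c = a) :
    pvBadT a p (c::t) = pvBadT a p t := by
  cases t with
  | nil => simp [pvBadT]
  | cons b u => rw [pvBadT.eq_def]; simp_all

theorem pvBad_single {a : Char} {p : List Char} {t : List Char} (h : t.head? ≠ some a) :
    pvBadT a p (a::t) = pvBadT a p t := by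
  cases t with
  | nil => simp [pvBadT]
  | cons b u =>
    have hb : ¬ b = a := by simpa using h
    rw [pvBadT.eq_def]; simp_all

theorem pvBad_pair (a : Char) (p t : List Char) :
    pvBadT a p (a::a::t) = (decide (t.take p.length = p) || pvBadT a p t) := by
  simp [pvBadT]

theorem take1_ne {u : List Char} {x : Char} (h : ¬ u.take 1 = [x]) : u.head? ≠ some x := by
  cases u <;> simp_all

theorem pvPfxF4 {o o' o'' o''' c c' c'' : Char} (os' : List Char) {w : List Char}
    (h : w.head? ≠ some o''') :
    (o :: o' :: o'' :: o''' :: os').isPrefixOf (c :: c' :: c'' :: w) = false := by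
  rw [pvPfx_cons, pvPfx_cons, pvPfx_cons, pvPfxF' os' h]; simp

theorem head_eq_cons {c : Char} {t : List Char} (h : t.head? = some c) : ∃ u, t = c :: u := by
  cases t <;> simp_all

theorem take2_ne {u : List Char} (h : ('S'::u).take 2 ≠ ['S','S']) : u.head? ≠ some 'S' := by
  cases u <;> simp_all

theorem pvPipe_yyy (t : List Char)
    (ga : ['y','y','y','y'].isPrefixOf ('y'::'y'::'y'::t) = false)
    (gb : ['y','y','y','y'].isPrefixOf ('y'::'y'::t) = false)
    (gc : ['y','y','y','y'].isPrefixOf ('y'::t) = false)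
    (gd : ['y','y'].isPrefixOf ('y' :: pvS1 t) = false) :
    pvPipe ('y'::'y'::'y'::t) = '%'::'y'::'y'::pvPipe t := by
  unfold pvS1 at gd
  unfold pvPipe pvS9 pvS8 pvS7 pvS6 pvS5 pvS4 pvS3 pvS2 pvS1
  rw [pvRepl_skip ga, pvRepl_skip gb, pvRepl_skip gc]
  simp only [pvRepl_match2, pvRepl_skipb, Char.reduceBEq]
  rw [pvRepl_skip gd]
  simp only [pvRepl_skipb, Char.reduceBEq]

theorem pvPipe_y1 (t : List Char) (h : t.head? ≠ some 'y') :
    pvPipe ('y'::t) = 'y'::pvPipe t :=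
  pvPipe_cons' 'y' t (pvPfxF2 ['y','y'] h) (pvPfxF2 [] (pvS1_head (by decide) h))
    (pvPfxF _ _ (by decide)) (pvPfxF _ _ (by decide)) (pvPfxF _ _ (by decide))
    (pvPfxF _ _ (by decide)) (pvPfxF _ _ (by decide)) (pvPfxF _ _ (by decide))
    (pvPfxF _ _ (by decide)) (by decide)

theorem pvPipe_yy2 (t : List Char) (h : t.head? ≠ some 'y') :
    pvPipe ('y'::'y'::t) = '%'::'y'::pvPipe t :=
  pvPipe_yy t (pvPfxF3 ['y'] h) (pvPfxF2 ['y','y'] h)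

theorem pvPipe_yyy3 (t : List Char) (h : t.head? ≠ some 'y') :
    pvPipe ('y'::'y'::'y'::t) = '%'::'y'::'y'::pvPipe t :=
  pvPipe_yyy t (pvPfxF4 [] h) (pvPfxF3 ['y'] h) (pvPfxF2 ['y','y'] h)
    (pvPfxF2 [] (pvS1_head (by decide) h))

theorem pvPipe_M1 (t : List Char) (h : t.head? ≠ some 'M') :
    pvPipe ('M'::t) = 'M'::pvPipe t :=
  pvPipe_cons' 'M' t (pvPfxF _ _ (by decide)) (pvPfxF _ _ (by decide))
    (pvPfxF2 [] (pvS2_head (by decide) h))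
    (pvPfxF _ _ (by decide)) (pvPfxF _ _ (by decide)) (pvPfxF _ _ (by decide))
    (pvPfxF _ _ (by decide)) (pvPfxF _ _ (by decide)) (pvPfxF _ _ (by decide)) (by decide)

theorem pvPipe_MMc (t : List Char) (h : t.head? ≠ some 'm') :
    pvPipe ('M'::'M'::t) = '%'::'m'::pvPipe t :=
  pvPipe_MM t (pvPfxF2 [] (pvS6_head (by decide) h))

theorem pvPipe_d1 (t : List Char) (h : t.head? ≠ some 'd') :
    pvPipe ('d'::t) = 'd'::pvPipe t :=
  pvPipe_cons' 'd' t (pvPfxF _ _ (by decide)) (pvPfxF _ _ (by decide)) (pvPfxF _ _ (by decide))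
    (pvPfxF2 [] (pvS3_head (by decide) h))
    (pvPfxF _ _ (by decide)) (pvPfxF _ _ (by decide)) (pvPfxF _ _ (by decide))
    (pvPfxF _ _ (by decide)) (pvPfxF _ _ (by decide)) (by decide)

theorem pvPipe_H1 (t : List Char) (h : t.head? ≠ some 'H') :
    pvPipe ('H'::t) = 'H'::pvPipe t :=
  pvPipe_cons' 'H' t (pvPfxF _ _ (by decide)) (pvPfxF _ _ (by decide)) (pvPfxF _ _ (by decide))
    (pvPfxF _ _ (by decide)) (pvPfxF2 [] (pvS4_head (by decide) h))
    (pvPfxF _ _ (by decide)) (pvPfxF _ _ (by decide)) (pvPfxF _ _ (by decide))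
    (pvPfxF _ _ (by decide)) (by decide)

theorem pvPipe_h1 (t : List Char) (h : t.head? ≠ some 'h') :
    pvPipe ('h'::t) = 'h'::pvPipe t :=
  pvPipe_cons' 'h' t (pvPfxF _ _ (by decide)) (pvPfxF _ _ (by decide)) (pvPfxF _ _ (by decide))
    (pvPfxF _ _ (by decide)) (pvPfxF _ _ (by decide)) (pvPfxF2 [] (pvS5_head (by decide) h))
    (pvPfxF _ _ (by decide)) (pvPfxF _ _ (by decide)) (pvPfxF _ _ (by decide)) (by decide)

theorem pvPipe_m1 (t : List Char) (h : t.head? ≠ some 'm') :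
    pvPipe ('m'::t) = 'm'::pvPipe t :=
  pvPipe_cons' 'm' t (pvPfxF _ _ (by decide)) (pvPfxF _ _ (by decide)) (pvPfxF _ _ (by decide))
    (pvPfxF _ _ (by decide)) (pvPfxF _ _ (by decide)) (pvPfxF _ _ (by decide))
    (pvPfxF2 [] (pvS6_head (by decide) h))
    (pvPfxF _ _ (by decide)) (pvPfxF _ _ (by decide)) (by decide)

theorem pvPipe_s1 (t : List Char) (h : t.head? ≠ some 's') :
    pvPipe ('s'::t) = 's'::pvPipe t :=
  pvPipe_cons' 's' t (pvPfxF _ _ (by decide)) (pvPfxF _ _ (by decide)) (pvPfxF _ _ (by decide))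
    (pvPfxF _ _ (by decide)) (pvPfxF _ _ (by decide)) (pvPfxF _ _ (by decide))
    (pvPfxF _ _ (by decide)) (pvPfxF2 [] (pvS7_head (by decide) h))
    (pvPfxF _ _ (by decide)) (by decide)

theorem pvPipe_ssc (t : List Char) (h2 : t.take 2 ≠ ['S','S']) :
    pvPipe ('s'::'s'::t) = '%'::'S'::pvPipe t := by
  apply pvPipe_ss t
  cases t with
  | nil => rw [pvS8_nil]; decide
  | cons c u =>
    by_cases hc : c = 'S'
    · subst hc
      rw [pvS8_Scons]
      exact pvPfxF3 [] (pvS8_head (by decide) (take2_ne h2))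
    · exact pvPfxF2 ['S'] (pvS8_head (show ('S':Char) ≠ '%' by decide) (show (c::u).head? ≠ some 'S' by simpa using hc))

theorem pvPipe_S1 (t : List Char) (h : t.head? ≠ some 'S') :
    pvPipe ('S'::t) = 'S'::pvPipe t :=
  pvPipe_cons' 'S' t (pvPfxF _ _ (by decide)) (pvPfxF _ _ (by decide)) (pvPfxF _ _ (by decide))
    (pvPfxF _ _ (by decide)) (pvPfxF _ _ (by decide)) (pvPfxF _ _ (by decide))
    (pvPfxF _ _ (by decide)) (pvPfxF _ _ (by decide))
    (pvPfxF2 ['S'] (pvS8_head (by decide) h)) (by decide)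

theorem pvPipe_SS2 (t : List Char) (h : t.head? ≠ some 'S') :
    pvPipe ('S'::'S'::t) = 'S'::'S'::pvPipe t := by
  have h8 : (pvS8 t).head? ≠ some 'S' := pvS8_head (by decide) h
  rw [pvPipe_cons' 'S' ('S'::t) (pvPfxF _ _ (by decide)) (pvPfxF _ _ (by decide))
       (pvPfxF _ _ (by decide)) (pvPfxF _ _ (by decide)) (pvPfxF _ _ (by decide))
       (pvPfxF _ _ (by decide)) (pvPfxF _ _ (by decide)) (pvPfxF _ _ (by decide))
       (by rw [pvS8_Scons]; exact pvPfxF3 [] h8) (by decide),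
     pvPipe_S1 t h]

theorem pvPipe_other (c : Char) (t : List Char) (h1 : c ≠ 'y') (h2 : c ≠ 'M') (h3 : c ≠ 'd')
    (h4 : c ≠ 'H') (h5 : c ≠ 'h') (h6 : c ≠ 'm') (h7 : c ≠ 's') (h8 : c ≠ 'S') (h9 : c ≠ 'a') :
    pvPipe (c::t) = c::pvPipe t :=
  pvPipe_cons' c t (pvPfxF _ _ (Ne.symm h1)) (pvPfxF _ _ (Ne.symm h1)) (pvPfxF _ _ (Ne.symm h2))
    (pvPfxF _ _ (Ne.symm h3)) (pvPfxF _ _ (Ne.symm h4)) (pvPfxF _ _ (Ne.symm h5))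
    (pvPfxF _ _ (Ne.symm h6)) (pvPfxF _ _ (Ne.symm h7)) (pvPfxF _ _ (Ne.symm h8)) h9

theorem ne_tail {x : Char} {u v : List Char} (h : u ≠ v) : x :: u ≠ x :: v := by simp [h]

theorem head_take1 {t : List Char} {x : Char} (h : t.head? ≠ some x) : t.take 1 ≠ [x] := by
  cases t <;> simp_all

theorem take2_eq {t : List Char} (h : t.take 2 = ['S','S']) : ∃ u, t = 'S'::'S'::u := by
  match t with
  | [] => simp at h
  | [a] => simp at h
  | a :: b :: u => simp_all

theorem pfx_single {x : Char} {w : List Char} : [x] <+: w ↔ w.head? = some x := by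
  cases w with
  | nil => simp
  | cons c u => simp [List.cons_prefix_cons, eq_comm]

theorem replHead {o b x : Char} (hx1 : x ≠ '%') (hx2 : x ≠ o) (u : List Char) :
    (pvRepl o [b] ['%'] u).head? = some x ↔ u.head? = some x := by
  cases u with
  | nil => simp [pvRepl]
  | cons c w =>
    rw [pvRepl]
    split
    · next hp =>
      have hc : c = o := by
        rcases List.isPrefixOf_iff_prefix.mp hp with ⟨r, hr⟩
        simpa using congrArg List.head? hr.symm
      subst hc
      apply iff_of_false
      · intro hh; simp at hh; exact hx1 hh.symm
      · intro hh; simp at hh; exact hx2 hh.symm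
    · simp

theorem replPreSS (u : List Char) :
    ['S','S'] <+: pvRepl 's' ['s'] ['%'] u ↔ ['S','S'] <+: u := by
  cases u with
  | nil => simp [pvRepl]
  | cons c w =>
    rw [pvRepl]
    split
    · next hp =>
      have hc : c = 's' := by
        rcases List.isPrefixOf_iff_prefix.mp hp with ⟨r, hr⟩
        simpa using congrArg List.head? hr.symm
      constructor
      · intro hh
        rcases hh with ⟨r, hr⟩
        simp at hr
      · intro hh
        rw [List.cons_prefix_cons] at hh
        exact absurd hh.1.symm (by simp [hc])
    · rw [List.cons_prefix_cons, List.cons_prefix_cons, pfx_single, pfx_single,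
          replHead (by decide) (by decide)]

-- the marker condition of D_ is exactly the pair-parity recursion pvBadT
theorem LM : ∀ n t, t.length ≤ n → '%' ∉ t →
    (['%','m'] <:+: pvRepl 'M' ['M'] ['%'] t ↔ pvBadT 'M' ['m'] t = true) := by
  intro n
  induction n with
  | zero =>
    intro t hl _
    have : t = [] := by cases t; rfl; simp at hl
    subst this
    simp [pvRepl, pvBadT]
  | succ n ih =>
    intro t hl hmem
    match t with
    | [] => simp [pvRepl, pvBadT]
    | c :: u =>
      by_cases hc : c = 'M'
      · subst hc
        by_cases h2 : u.head? = some 'M'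
        · obtain ⟨w, rfl⟩ := head_eq_cons h2
          rw [show pvRepl 'M' ['M'] ['%'] ('M'::'M'::w) = '%' :: pvRepl 'M' ['M'] ['%'] w from by
                simpa using pvRepl_match 'M' ['M'] ['%'] w,
              List.infix_cons_iff, List.cons_prefix_cons, pfx_single,
              replHead (by decide) (by decide),
              ih w (by simp at hl; omega) (by simp at hmem ⊢; tauto),
              show pvBadT 'M' ['m'] ('M'::'M'::w) = (decide (w.take 1 = ['m']) || pvBadT 'M' ['m'] w) from by simp [pvBadT]]
          constructor
          · rintro (⟨-, hh⟩ | hh)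
            · cases w <;> simp_all
            · simp [hh]
          · intro hh
            rcases Bool.or_eq_true .. |>.mp hh with hh | hh
            · exact Or.inl ⟨rfl, by cases w <;> simp_all⟩
            · exact Or.inr hh
        · rw [pvRepl_skip (pvPfxF2 [] h2), List.infix_cons_iff, List.cons_prefix_cons,
              ih u (by simp at hl; omega) (by simp at hmem ⊢; tauto), pvBad_single h2]
          simp
      · have hcp : c ≠ '%' := by intro hh; exact hmem (hh ▸ List.mem_cons_self ..)
        rw [pvRepl_skip' _ _ _ (Ne.symm hc), List.infix_cons_iff, List.cons_prefix_cons,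
            ih u (by simp at hl; omega) (by simp at hmem ⊢; tauto), pvBad_ne hc]
        simp [Ne.symm hcp]

theorem LS : ∀ n t, t.length ≤ n → '%' ∉ t →
    (['%','S','S'] <:+: pvRepl 's' ['s'] ['%'] t ↔ pvBadT 's' ['S','S'] t = true) := by
  intro n
  induction n with
  | zero =>
    intro t hl _
    have : t = [] := by cases t; rfl; simp at hl
    subst this
    simp [pvRepl, pvBadT]
  | succ n ih =>
    intro t hl hmem
    match t with
    | [] => simp [pvRepl, pvBadT]
    | c :: u =>
      by_cases hc : c = 's'
      · subst hc
        by_cases h2 : u.head? = some 's'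
        · obtain ⟨w, rfl⟩ := head_eq_cons h2
          rw [show pvRepl 's' ['s'] ['%'] ('s'::'s'::w) = '%' :: pvRepl 's' ['s'] ['%'] w from by
                simpa using pvRepl_match 's' ['s'] ['%'] w,
              List.infix_cons_iff, List.cons_prefix_cons, replPreSS,
              ih w (by simp at hl; omega) (by simp at hmem ⊢; tauto),
              show pvBadT 's' ['S','S'] ('s'::'s'::w) = (decide (w.take 2 = ['S','S']) || pvBadT 's' ['S','S'] w) from by simp [pvBadT]]
          constructor
          · rintro (⟨-, hh⟩ | hh)
            · rcases hh with ⟨r, hr⟩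
              simp [← hr]
            · simp [hh]
          · intro hh
            rcases Bool.or_eq_true .. |>.mp hh with hh | hh
            · refine Or.inl ⟨rfl, ?_⟩
              obtain ⟨w', rfl⟩ := take2_eq (by simpa using hh)
              exact ⟨w', rfl⟩
            · exact Or.inr hh
        · rw [pvRepl_skip (pvPfxF2 [] h2), List.infix_cons_iff, List.cons_prefix_cons,
              ih u (by simp at hl; omega) (by simp at hmem ⊢; tauto), pvBad_single h2]
          simp
      · have hcp : c ≠ '%' := by intro hh; exact hmem (hh ▸ List.mem_cons_self ..)
        rw [pvRepl_skip' _ _ _ (Ne.symm hc), List.infix_cons_iff, List.cons_prefix_cons,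
            ih u (by simp at hl; omega) (by simp at hmem ⊢; tauto), pvBad_ne hc]
        simp [Ne.symm hcp]

theorem no_pct {s : String} (h : PySem.Str.isIn "%" s = false) : '%' ∉ s.toList := by
  have h' : PySem.Chars.isIn ['%'] s.toList = false := h
  intro hm
  rw [PySem.Chars.isIn_eq_false_iff] at h'
  exact h' ((List.singleton_infix_iff '%' s.toList).mpr hm)

theorem DM_iff (s : String) (hp : PySem.Str.isIn "%" s = false) :
    PySem.Str.isIn "%m" (PySem.Str.replace s "MM" "%") = pvBadT 'M' ['m'] s.toList := by
  have h1 : PySem.Str.isIn "%m" (PySem.Str.replace s "MM" "%")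
      = PySem.Chars.isIn ['%','m'] ((PySem.Str.replace s "MM" "%").toList) := rfl
  rw [h1, PySem.Str.toList_replace,
      show ("MM" : String).toList = 'M' :: ['M'] from rfl,
      show ("%" : String).toList = ['%'] from rfl, pvReplace_eq]
  cases hb : pvBadT 'M' ['m'] s.toList
  · rw [PySem.Chars.isIn_eq_false_iff]
    intro hinf
    have := (LM s.toList.length s.toList (le_refl _) (no_pct hp)).mp hinf
    simp [hb] at this
  · exact (PySem.Chars.isIn_iff_infix _ _).mpr
      ((LM s.toList.length s.toList (le_refl _) (no_pct hp)).mpr hb)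

theorem DS_iff (s : String) (hp : PySem.Str.isIn "%" s = false) :
    PySem.Str.isIn "%SS" (PySem.Str.replace s "ss" "%") = pvBadT 's' ['S','S'] s.toList := by
  have h1 : PySem.Str.isIn "%SS" (PySem.Str.replace s "ss" "%")
      = PySem.Chars.isIn ['%','S','S'] ((PySem.Str.replace s "ss" "%").toList) := rfl
  rw [h1, PySem.Str.toList_replace,
      show ("ss" : String).toList = 's' :: ['s'] from rfl,
      show ("%" : String).toList = ['%'] from rfl, pvReplace_eq]
  cases hb : pvBadT 's' ['S','S'] s.toList
  · rw [PySem.Chars.isIn_eq_false_iff]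
    intro hinf
    have := (LS s.toList.length s.toList (le_refl _) (no_pct hp)).mp hinf
    simp [hb] at this
  · exact (PySem.Chars.isIn_iff_infix _ _).mpr
      ((LS s.toList.length s.toList (le_refl _) (no_pct hp)).mpr hb)

theorem pvPipe_MMm (t : List Char) :
    pvPipe ('M'::'M'::'m'::t) = '%'::'%'::'M'::pvPipe t := by
  unfold pvPipe pvS9 pvS8 pvS7 pvS6 pvS5 pvS4 pvS3 pvS2 pvS1
  simp only [pvRepl_match2, pvRepl_skipb, Char.reduceBEq]

theorem pvPipe_ssSS (t : List Char) :
    pvPipe ('s'::'s'::'S'::'S'::t) = '%'::'%'::'f'::pvPipe t := by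
  unfold pvPipe pvS9 pvS8 pvS7 pvS6 pvS5 pvS4 pvS3 pvS2 pvS1
  simp only [pvRepl_match2, pvRepl_match3, pvRepl_skipb, Char.reduceBEq]

theorem pvTight : ∀ n l, l.length ≤ n →
    (pvBadT 'M' ['m'] l = true ∨ pvBadT 's' ['S','S'] l = true) →
    pvPipe l ≠ pvAltScan l := by
  intro n
  induction n with
  | zero =>
    intro l hl hbad
    have : l = [] := by cases l; rfl; simp at hl
    subst this
    simp [pvBadT] at hbad
  | succ n ih =>
    intro l hl hbad
    cases l with
    | nil => simp [pvBadT] at hbad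
    | cons c t =>
      by_cases hy : c = 'y'
      · subst hy
        have hbad' : pvBadT 'M' ['m'] t = true ∨ pvBadT 's' ['S','S'] t = true := by
          simpa [pvBad_ne] using hbad
        by_cases h2 : t.head? = some 'y'
        · obtain ⟨t2, rfl⟩ := head_eq_cons h2
          have hbad2 : pvBadT 'M' ['m'] t2 = true ∨ pvBadT 's' ['S','S'] t2 = true := by
            simpa [pvBad_ne] using hbad'
          by_cases h3 : t2.head? = some 'y'
          · obtain ⟨t3, rfl⟩ := head_eq_cons h3
            have hbad3 : pvBadT 'M' ['m'] t3 = true ∨ pvBadT 's' ['S','S'] t3 = true := by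
              simpa [pvBad_ne] using hbad2
            by_cases h4 : t3.head? = some 'y'
            · obtain ⟨t4, rfl⟩ := head_eq_cons h4
              rw [pvPipe_yyyy, sc_yyyy]
              exact ne_tail (ne_tail (ih t4 (by simp at hl; omega)
                (by simpa [pvBad_ne] using hbad3)))
            · rw [pvPipe_yyy3 t3 h4, sc_yyy t3 h4]
              exact ne_tail (ne_tail (ne_tail (ih t3 (by simp at hl; omega) hbad3)))
          · rw [pvPipe_yy2 t2 h3, sc_yy t2 h3]
            exact ne_tail (ne_tail (ih t2 (by simp at hl; omega) hbad2))
        · rw [pvPipe_y1 t h2, sc_y t h2]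
          exact ne_tail (ih t (by simp at hl; omega) hbad')
      by_cases hMc : c = 'M'
      · subst hMc
        by_cases h2 : t.head? = some 'M'
        · obtain ⟨t2, rfl⟩ := head_eq_cons h2
          by_cases hm : t2.head? = some 'm'
          · obtain ⟨u, rfl⟩ := head_eq_cons hm
            rw [pvPipe_MMm, sc_MM]
            intro h
            simp at h
          · have htk : ¬ t2.take 1 = ['m'] := head_take1 hm
            have hbad' : pvBadT 'M' ['m'] t2 = true ∨ pvBadT 's' ['S','S'] t2 = true := by
              rcases hbad with hb | hb
              · rw [pvBad_pair] at hb
                simp [htk] at hb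
                exact Or.inl hb
              · exact Or.inr (by simpa [pvBad_ne] using hb)
            rw [pvPipe_MMc t2 hm, sc_MM]
            exact ne_tail (ne_tail (ih t2 (by simp at hl; omega) hbad'))
        · have hbad' : pvBadT 'M' ['m'] t = true ∨ pvBadT 's' ['S','S'] t = true := by
            rcases hbad with hb | hb
            · exact Or.inl (by rw [pvBad_single h2] at hb; exact hb)
            · exact Or.inr (by simpa [pvBad_ne] using hb)
          rw [pvPipe_M1 t h2, sc_M t h2]
          exact ne_tail (ih t (by simp at hl; omega) hbad')
      by_cases hdc : c = 'd'
      · subst hdc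
        have hbad' : pvBadT 'M' ['m'] t = true ∨ pvBadT 's' ['S','S'] t = true := by
          simpa [pvBad_ne] using hbad
        by_cases h2 : t.head? = some 'd'
        · obtain ⟨t2, rfl⟩ := head_eq_cons h2
          rw [pvPipe_dd, sc_dd]
          exact ne_tail (ne_tail (ih t2 (by simp at hl; omega)
            (by simpa [pvBad_ne] using hbad')))
        · rw [pvPipe_d1 t h2, sc_d t h2]
          exact ne_tail (ih t (by simp at hl; omega) hbad')
      by_cases hHc : c = 'H'
      · subst hHc
        have hbad' : pvBadT 'M' ['m'] t = true ∨ pvBadT 's' ['S','S'] t = true := by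
          simpa [pvBad_ne] using hbad
        by_cases h2 : t.head? = some 'H'
        · obtain ⟨t2, rfl⟩ := head_eq_cons h2
          rw [pvPipe_HH, sc_HH]
          exact ne_tail (ne_tail (ih t2 (by simp at hl; omega)
            (by simpa [pvBad_ne] using hbad')))
        · rw [pvPipe_H1 t h2, sc_H t h2]
          exact ne_tail (ih t (by simp at hl; omega) hbad')
      by_cases hhc : c = 'h'
      · subst hhc
        have hbad' : pvBadT 'M' ['m'] t = true ∨ pvBadT 's' ['S','S'] t = true := by
          simpa [pvBad_ne] using hbad
        by_cases h2 : t.head? = some 'h'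
        · obtain ⟨t2, rfl⟩ := head_eq_cons h2
          rw [pvPipe_hh, sc_hh]
          exact ne_tail (ne_tail (ih t2 (by simp at hl; omega)
            (by simpa [pvBad_ne] using hbad')))
        · rw [pvPipe_h1 t h2, sc_h t h2]
          exact ne_tail (ih t (by simp at hl; omega) hbad')
      by_cases hmc : c = 'm'
      · subst hmc
        have hbad' : pvBadT 'M' ['m'] t = true ∨ pvBadT 's' ['S','S'] t = true := by
          simpa [pvBad_ne] using hbad
        by_cases h2 : t.head? = some 'm'
        · obtain ⟨t2, rfl⟩ := head_eq_cons h2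
          rw [pvPipe_mm, sc_mm]
          exact ne_tail (ne_tail (ih t2 (by simp at hl; omega)
            (by simpa [pvBad_ne] using hbad')))
        · rw [pvPipe_m1 t h2, sc_m t h2]
          exact ne_tail (ih t (by simp at hl; omega) hbad')
      by_cases hsc : c = 's'
      · subst hsc
        by_cases h2 : t.head? = some 's'
        · obtain ⟨t2, rfl⟩ := head_eq_cons h2
          by_cases hs2 : t2.take 2 = ['S','S']
          · obtain ⟨u, rfl⟩ := take2_eq hs2
            rw [pvPipe_ssSS, sc_ss]
            intro h
            simp at h
          · have hbad' : pvBadT 'M' ['m'] t2 = true ∨ pvBadT 's' ['S','S'] t2 = true := by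
              rcases hbad with hb | hb
              · exact Or.inl (by simpa [pvBad_ne] using hb)
              · rw [pvBad_pair] at hb
                simp [hs2] at hb
                exact Or.inr hb
            rw [pvPipe_ssc t2 hs2, sc_ss]
            exact ne_tail (ne_tail (ih t2 (by simp at hl; omega) hbad'))
        · have hbad' : pvBadT 'M' ['m'] t = true ∨ pvBadT 's' ['S','S'] t = true := by
            rcases hbad with hb | hb
            · exact Or.inl (by simpa [pvBad_ne] using hb)
            · exact Or.inr (by rw [pvBad_single h2] at hb; exact hb)
          rw [pvPipe_s1 t h2, sc_s t h2]
          exact ne_tail (ih t (by simp at hl; omega) hbad')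
      by_cases hSc : c = 'S'
      · subst hSc
        have hbad' : pvBadT 'M' ['m'] t = true ∨ pvBadT 's' ['S','S'] t = true := by
          simpa [pvBad_ne] using hbad
        by_cases h2 : t.head? = some 'S'
        · obtain ⟨t2, rfl⟩ := head_eq_cons h2
          have hbad2 : pvBadT 'M' ['m'] t2 = true ∨ pvBadT 's' ['S','S'] t2 = true := by
            simpa [pvBad_ne] using hbad'
          by_cases h3 : t2.head? = some 'S'
          · obtain ⟨t3, rfl⟩ := head_eq_cons h3
            rw [pvPipe_SSS, sc_SSS]
            exact ne_tail (ne_tail (ih t3 (by simp at hl; omega)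
              (by simpa [pvBad_ne] using hbad2)))
          · rw [pvPipe_SS2 t2 h3, sc_SS t2 h3]
            exact ne_tail (ne_tail (ih t2 (by simp at hl; omega) hbad2))
        · rw [pvPipe_S1 t h2, sc_S t h2]
          exact ne_tail (ih t (by simp at hl; omega) hbad')
      by_cases hac : c = 'a'
      · subst hac
        rw [pvPipe_a, sc_a]
        exact ne_tail (ne_tail (ih t (by simp at hl; omega)
          (by simpa [pvBad_ne] using hbad)))
      · have hbad' : pvBadT 'M' ['m'] t = true ∨ pvBadT 's' ['S','S'] t = true := by
          rcases hbad with hb | hb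
          · exact Or.inl (by rw [pvBad_ne hMc] at hb; exact hb)
          · exact Or.inr (by rw [pvBad_ne hsc] at hb; exact hb)
        rw [pvPipe_other c t hy hMc hdc hHc hhc hmc hsc hSc hac,
            sc_other c t hy hMc hdc hHc hhc hmc hsc hSc hac]
        exact ne_tail (ih t (by simp at hl; omega) hbad')

theorem pvMain : ∀ n l, l.length ≤ n → pvBadT 'M' ['m'] l = false → pvBadT 's' ['S','S'] l = false →
    pvPipe l = pvAltScan l := by
  intro n
  induction n with
  | zero =>
    intro l hl _ _
    cases l with
    | nil => rw [pvPipe_nil, sc_nil]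
    | cons c t => simp at hl
  | succ n ih =>
    intro l hl hbM hbS
    cases l with
    | nil => rw [pvPipe_nil, sc_nil]
    | cons c t =>
      by_cases hy : c = 'y'
      · subst hy
        by_cases h2 : t.head? = some 'y'
        · obtain ⟨t2, rfl⟩ := head_eq_cons h2
          by_cases h3 : t2.head? = some 'y'
          · obtain ⟨t3, rfl⟩ := head_eq_cons h3
            by_cases h4 : t3.head? = some 'y'
            · obtain ⟨t4, rfl⟩ := head_eq_cons h4
              rw [pvPipe_yyyy, sc_yyyy,
                  ih t4 (by simp at hl; omega) (by simpa [pvBad_ne] using hbM)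
                    (by simpa [pvBad_ne] using hbS)]
            · rw [pvPipe_yyy3 t3 h4, sc_yyy t3 h4,
                  ih t3 (by simp at hl; omega) (by simpa [pvBad_ne] using hbM)
                    (by simpa [pvBad_ne] using hbS)]
          · rw [pvPipe_yy2 t2 h3, sc_yy t2 h3,
                ih t2 (by simp at hl; omega) (by simpa [pvBad_ne] using hbM)
                  (by simpa [pvBad_ne] using hbS)]
        · rw [pvPipe_y1 t h2, sc_y t h2,
              ih t (by simp at hl; omega) (by simpa [pvBad_ne] using hbM)
                (by simpa [pvBad_ne] using hbS)]
      by_cases hMc : c = 'M'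
      · subst hMc
        by_cases h2 : t.head? = some 'M'
        · obtain ⟨t2, rfl⟩ := head_eq_cons h2
          rw [pvBad_pair] at hbM
          simp at hbM
          rw [pvPipe_MMc t2 (take1_ne hbM.1), sc_MM,
              ih t2 (by simp at hl; omega) hbM.2 (by simpa [pvBad_ne] using hbS)]
        · have hbM' : pvBadT 'M' ['m'] t = false := by rw [pvBad_single h2] at hbM; exact hbM
          rw [pvPipe_M1 t h2, sc_M t h2,
              ih t (by simp at hl; omega) hbM' (by simpa [pvBad_ne] using hbS)]
      by_cases hdc : c = 'd'
      · subst hdc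
        by_cases h2 : t.head? = some 'd'
        · obtain ⟨t2, rfl⟩ := head_eq_cons h2
          rw [pvPipe_dd, sc_dd,
              ih t2 (by simp at hl; omega) (by simpa [pvBad_ne] using hbM)
                (by simpa [pvBad_ne] using hbS)]
        · rw [pvPipe_d1 t h2, sc_d t h2,
              ih t (by simp at hl; omega) (by simpa [pvBad_ne] using hbM)
                (by simpa [pvBad_ne] using hbS)]
      by_cases hHc : c = 'H'
      · subst hHc
        by_cases h2 : t.head? = some 'H'
        · obtain ⟨t2, rfl⟩ := head_eq_cons h2
          rw [pvPipe_HH, sc_HH,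
              ih t2 (by simp at hl; omega) (by simpa [pvBad_ne] using hbM)
                (by simpa [pvBad_ne] using hbS)]
        · rw [pvPipe_H1 t h2, sc_H t h2,
              ih t (by simp at hl; omega) (by simpa [pvBad_ne] using hbM)
                (by simpa [pvBad_ne] using hbS)]
      by_cases hhc : c = 'h'
      · subst hhc
        by_cases h2 : t.head? = some 'h'
        · obtain ⟨t2, rfl⟩ := head_eq_cons h2
          rw [pvPipe_hh, sc_hh,
              ih t2 (by simp at hl; omega) (by simpa [pvBad_ne] using hbM)
                (by simpa [pvBad_ne] using hbS)]
        · rw [pvPipe_h1 t h2, sc_h t h2,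
              ih t (by simp at hl; omega) (by simpa [pvBad_ne] using hbM)
                (by simpa [pvBad_ne] using hbS)]
      by_cases hmc : c = 'm'
      · subst hmc
        by_cases h2 : t.head? = some 'm'
        · obtain ⟨t2, rfl⟩ := head_eq_cons h2
          rw [pvPipe_mm, sc_mm,
              ih t2 (by simp at hl; omega) (by simpa [pvBad_ne] using hbM)
                (by simpa [pvBad_ne] using hbS)]
        · rw [pvPipe_m1 t h2, sc_m t h2,
              ih t (by simp at hl; omega) (by simpa [pvBad_ne] using hbM)
                (by simpa [pvBad_ne] using hbS)]
      by_cases hsc : c = 's'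
      · subst hsc
        by_cases h2 : t.head? = some 's'
        · obtain ⟨t2, rfl⟩ := head_eq_cons h2
          rw [pvBad_pair] at hbS
          simp at hbS
          rw [pvPipe_ssc t2 hbS.1, sc_ss,
              ih t2 (by simp at hl; omega) (by simpa [pvBad_ne] using hbM) hbS.2]
        · have hbS' : pvBadT 's' ['S','S'] t = false := by rw [pvBad_single h2] at hbS; exact hbS
          rw [pvPipe_s1 t h2, sc_s t h2,
              ih t (by simp at hl; omega) (by simpa [pvBad_ne] using hbM) hbS']
      by_cases hSc : c = 'S'
      · subst hSc
        by_cases h2 : t.head? = some 'S'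
        · obtain ⟨t2, rfl⟩ := head_eq_cons h2
          by_cases h3 : t2.head? = some 'S'
          · obtain ⟨t3, rfl⟩ := head_eq_cons h3
            rw [pvPipe_SSS, sc_SSS,
                ih t3 (by simp at hl; omega) (by simpa [pvBad_ne] using hbM)
                  (by simpa [pvBad_ne] using hbS)]
          · rw [pvPipe_SS2 t2 h3, sc_SS t2 h3,
                ih t2 (by simp at hl; omega) (by simpa [pvBad_ne] using hbM)
                  (by simpa [pvBad_ne] using hbS)]
        · rw [pvPipe_S1 t h2, sc_S t h2,
              ih t (by simp at hl; omega) (by simpa [pvBad_ne] using hbM)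
                (by simpa [pvBad_ne] using hbS)]
      by_cases hac : c = 'a'
      · subst hac
        rw [pvPipe_a, sc_a,
            ih t (by simp at hl; omega) (by simpa [pvBad_ne] using hbM)
              (by simpa [pvBad_ne] using hbS)]
      · rw [pvPipe_other c t hy hMc hdc hHc hhc hmc hsc hSc hac,
            sc_other c t hy hMc hdc hHc hhc hmc hsc hSc hac,
            ih t (by simp at hl; omega) (by rw [pvBad_ne hMc] at hbM; exact hbM)
              (by rw [pvBad_ne hsc] at hbS; exact hbS)]

theorem portA_eq (s : String) (h : PySem.Str.isIn "%" s = false) :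
    (convert_to_python_format_py s).toList = pvPipe s.toList := by
  unfold convert_to_python_format_py
  rw [if_neg (by simp [PySem.Str.isIn]; simpa using h)]
  simp only [List.foldl, PySem.Str.toList_replace]
  rw [show ("yyyy" : String).toList = 'y' :: ['y','y','y'] from rfl,
      show ("yy" : String).toList = 'y' :: ['y'] from rfl,
      show ("MM" : String).toList = 'M' :: ['M'] from rfl,
      show ("dd" : String).toList = 'd' :: ['d'] from rfl,
      show ("HH" : String).toList = 'H' :: ['H'] from rfl,
      show ("hh" : String).toList = 'h' :: ['h'] from rfl,
      show ("mm" : String).toList = 'm' :: ['m'] from rfl,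
      show ("ss" : String).toList = 's' :: ['s'] from rfl,
      show ("SSS" : String).toList = 'S' :: ['S','S'] from rfl,
      show ("a" : String).toList = 'a' :: ([] : List Char) from rfl]
  simp only [pvReplace_eq]
  rfl

-- ===== VERDICT (by name: the statement is the Claim_ definition above) =====
theorem convert_to_python_format_py_spec : Claim_unchanged_convert_to_python_format_py := by
  intro s _ hnd
  by_cases hin : PySem.Str.isIn "%" s = true
  · unfold convert_to_python_format_py convert_to_python_format_py_alt
    rw [if_pos hin, if_pos hin]
  · have hin' : PySem.Str.isIn "%" s = false := by
      cases h : PySem.Str.isIn "%" s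
      · rfl
      · exact absurd h hin
    have hMS : (PySem.Str.isIn "%m" (PySem.Str.replace s "MM" "%") ||
        PySem.Str.isIn "%SS" (PySem.Str.replace s "ss" "%")) = false := by
      cases h : (PySem.Str.isIn "%m" (PySem.Str.replace s "MM" "%") ||
          PySem.Str.isIn "%SS" (PySem.Str.replace s "ss" "%"))
      · rfl
      · exact absurd ⟨hin', h⟩ hnd
    rw [DM_iff s hin', DS_iff s hin'] at hMS
    simp only [Bool.or_eq_false_iff] at hMS
    have hM := hMS.1
    have hS := hMS.2
    apply String.toList_inj.mp
    rw [portA_eq s hin', pvMain s.toList.length s.toList (le_refl _) hM hS]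
    unfold convert_to_python_format_py_alt
    rw [if_neg hin]
    simp

set_option maxRecDepth 8192 in
theorem convert_to_python_format_py_changed : Claim_changed_convert_to_python_format_py := by
  unfold Claim_changed_convert_to_python_format_py
  refine ⟨by decide, by decide, ?_, ?_, ?_⟩
  · unfold convert_to_python_format_py
    rw [if_neg (by decide)]
    apply String.toList_inj.mp
    simp only [List.foldl, PySem.Str.toList_replace]
    decide
  · unfold convert_to_python_format_py_alt
    rw [if_neg (by decide)]
    apply String.toList_inj.mp
    simp only [String.toList_ofList]
    rw [show pvDiffWitness_convert_to_python_format_py.toList = ['M','M','m'] from rfl,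
        show pvDiffWitnessOut_convert_to_python_format_py.2.toList = ['%','m','m'] from rfl]
    simp [pvAltScan]
  · exact fun h => absurd (congrArg String.toList h) (by decide)

theorem convert_to_python_format_py_tight : Claim_exact_convert_to_python_format_py := by
  intro s _ hd
  obtain ⟨hin', hmark⟩ := hd
  rw [DM_iff s hin', DS_iff s hin'] at hmark
  have hbad : pvBadT 'M' ['m'] s.toList = true ∨ pvBadT 's' ['S','S'] s.toList = true :=
    Bool.or_eq_true .. |>.mp hmark
  intro heq
  have hT := congrArg String.toList heq
  rw [portA_eq s hin'] at hT
  have hne : ¬ (PySem.Str.isIn "%" s = true) := by rw [hin']; simp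
  have hB : (convert_to_python_format_py_alt s).toList = pvAltScan s.toList := by
    unfold convert_to_python_format_py_alt
    rw [if_neg hne]
    simp
  rw [hB] at hT
  exact pvTight s.toList.length s.toList (le_refl _) hbad hT
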